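-- pv_equiv track=rewrite | github.com/sras/ghci-remote | rcghci/rcghci.py | make_error_blocks
-- ===== SOURCE A (Python) =====
-- def make_error_blocks(content):
--     errors = []
--     warnings = []
--     if content is not None and len(content) > 0:
--         if "\n\n" in content:
--             blocks = content.split("\n\n")
--         else:
--             blocks = content.split("\r\n")
--         for b in blocks:
--             lines = b.strip().split("\n")
--             for idx, line in enumerate(lines):
--                 try:
--                     (file_name, line, column, type_, _) = line.split(":")[0:5]
--                 except Exception as err :
--                     continue
--                 type_ = type_.strip()
--                 if "error" in type_:
--                     errors.append('\n'.join(lines[idx:]))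
--                 elif "warning" in type_:
--                     warnings.append('\n'.join(lines[idx:]))
--     return {"errors" : errors, "warnings": warnings}
-- ===== SOURCE B (Python) =====
-- def make_error_blocks(content):
--     # Backward scan per block with a running suffix string instead of
--     # re-joining lines[idx:] at every hit; collected entries are reversed
--     # per block to restore the forward order.
--     errors = []
--     warnings = []
--     if content:
--         if "\n\n" in content:
--             blocks = content.split("\n\n")
--         else:
--             blocks = content.split("\r\n")
--         for b in blocks:
--             lines = b.strip().split("\n")
--             errs_rev = []
--             warns_rev = []
--             suffix = None
--             for line in reversed(lines):
--                 suffix = line if suffix is None else line + "\n" + suffix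
--                 parts = line.split(":")
--                 if len(parts) < 5:
--                     continue
--                 t = parts[3].strip()
--                 if "error" in t:
--                     errs_rev.append(suffix)
--                 elif "warning" in t:
--                     warns_rev.append(suffix)
--             errors.extend(reversed(errs_rev))
--             warnings.extend(reversed(warns_rev))
--     return {"errors": errors, "warnings": warnings}
-- ===== Notes on version B (the rewrite author's own statement) =====
-- stated objective: alternative
-- what changed: B replaces A's forward enumerate pass that re-joins lines[idx:] at every hit (with a try/except five-way unpack) by a single backward scan per block that maintains a running suffix string, tests len(parts) < 5 explicitly, and reverses the per-block hit lists to restore forward order.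
import Mathlib
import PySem

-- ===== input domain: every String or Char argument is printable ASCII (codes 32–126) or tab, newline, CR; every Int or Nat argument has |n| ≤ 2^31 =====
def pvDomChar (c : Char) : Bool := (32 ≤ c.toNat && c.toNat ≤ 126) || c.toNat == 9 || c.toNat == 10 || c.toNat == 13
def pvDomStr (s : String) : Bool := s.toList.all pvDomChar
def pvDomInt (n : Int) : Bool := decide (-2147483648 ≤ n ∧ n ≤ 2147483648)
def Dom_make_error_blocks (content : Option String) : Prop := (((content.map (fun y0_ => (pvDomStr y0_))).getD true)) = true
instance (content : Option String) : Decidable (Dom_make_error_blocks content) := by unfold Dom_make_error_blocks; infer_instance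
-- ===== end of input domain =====

-- B rewrites A's forward pass (a join of lines[idx:] at every hit) as a backward scan with a
-- running suffix string, reversing the per-block hit lists; same return value (objective: alternative).

-- ===== PORT A =====
-- A: forward loop over enumerate(lines); five-way unpack of line.split(":")[0:5] in try/except.
-- '.getD []' on split? only totalises: every separator is a literal non-empty string.
def aLineStep (lines : List String) (acc : List String × List String) (p : Int × String) :
    List String × List String :=
  match PySem.List.slice ((PySem.Str.split? p.2 ":").getD []) none (some 5) with
  | [_file_name, _line, _column, type_, _] =>
    let type_ := PySem.Str.strip type_
    if PySem.Str.isIn "error" type_ then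
      (acc.1 ++ [PySem.Str.join "\n" (PySem.List.slice lines (some p.1) none)], acc.2)
    else if PySem.Str.isIn "warning" type_ then
      (acc.1, acc.2 ++ [PySem.Str.join "\n" (PySem.List.slice lines (some p.1) none)])
    else acc
  | _ => acc

def aBlockStep (acc : List String × List String) (b : String) : List String × List String :=
  let lines := (PySem.Str.split? (PySem.Str.strip b) "\n").getD []
  (PySem.List.enumerate lines).foldl (aLineStep lines) acc

def make_error_blocks (content : Option String) : List (String × List String) :=
  let res : List String × List String :=
    match content with
    | some c =>
      if 0 < PySem.Str.len c then
        let blocks := if PySem.Str.isIn "\n\n" c then (PySem.Str.split? c "\n\n").getD []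
                      else (PySem.Str.split? c "\r\n").getD []
        blocks.foldl aBlockStep ([], [])
      else ([], [])
    | none => ([], [])
  [("errors", res.1), ("warnings", res.2)]

-- ===== PORT B =====
-- B: backward scan of a block's lines (the recursion reaches the last line first, like
-- 'for line in reversed(lines)'), carrying the running suffix and the reversed hit lists.
def pvScanBack (lines : List String) : Option String × List String × List String :=
  match lines with
  | [] => (none, [], [])
  | line :: rest =>
    let r := pvScanBack rest
    let suffix := match r.1 with
      | none => line
      | some s => line ++ "\n" ++ s
    let parts := (PySem.Str.split? line ":").getD []
    if parts.length < 5 then (some suffix, r.2.1, r.2.2)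
    else
      let t := PySem.Str.strip (parts[3]!)
      if PySem.Str.isIn "error" t then (some suffix, r.2.1 ++ [suffix], r.2.2)
      else if PySem.Str.isIn "warning" t then (some suffix, r.2.1, r.2.2 ++ [suffix])
      else (some suffix, r.2.1, r.2.2)

def bBlockStep (acc : List String × List String) (b : String) : List String × List String :=
  let r := pvScanBack ((PySem.Str.split? (PySem.Str.strip b) "\n").getD [])
  (acc.1 ++ r.2.1.reverse, acc.2 ++ r.2.2.reverse)

def make_error_blocks_alt (content : Option String) : List (String × List String) :=
  let res : List String × List String :=
    match content with
    | some c =>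
      if 0 < PySem.Str.len c then
        let blocks := if PySem.Str.isIn "\n\n" c then (PySem.Str.split? c "\n\n").getD []
                      else (PySem.Str.split? c "\r\n").getD []
        blocks.foldl bBlockStep ([], [])
      else ([], [])
    | none => ([], [])
  [("errors", res.1), ("warnings", res.2)]

-- ===== PRECONDITION & SPEC =====
def Spec_make_error_blocks (content : Option String) (out : List (String × List String)) : Prop := out = make_error_blocks_alt content
instance (content : Option String) (out : List (String × List String)) : Decidable (Spec_make_error_blocks content out) := by unfold Spec_make_error_blocks; infer_instance

-- ===== CLAIM (what is proved, stated in full; the proofs are below) =====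
def Claim_equal_make_error_blocks : Prop := ∀ (content : Option String), Dom_make_error_blocks content → Spec_make_error_blocks content (make_error_blocks content)

-- ===== LEMMAS AND PROOFS =====

-- forward specification of one block's hits: (errors, warnings) in source order
def pvHits : List String → List String × List String
  | [] => ([], [])
  | l :: rest =>
    let h := pvHits rest
    let parts := (PySem.Str.split? l ":").getD []
    if parts.length < 5 then h
    else
      let t := PySem.Str.strip (parts[3]!)
      if PySem.Str.isIn "error" t then (PySem.Str.join "\n" (l :: rest) :: h.1, h.2)
      else if PySem.Str.isIn "warning" t then (h.1, PySem.Str.join "\n" (l :: rest) :: h.2)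
      else h

theorem pv_join_cons (l : String) (rest : List String) (h : rest ≠ []) :
    PySem.Str.join "\n" (l :: rest) = l ++ "\n" ++ PySem.Str.join "\n" rest := by
  cases rest with
  | nil => exact absurd rfl h
  | cons q t =>
    apply String.toList_inj.mp
    simp only [String.toList_append, PySem.Str.toList_join, List.map]
    rw [PySem.Chars.join_cons_cons]

theorem pv_join_singleton (l : String) : PySem.Str.join "\n" [l] = l := by
  apply String.toList_inj.mp
  simp only [PySem.Str.toList_join, List.map]
  exact PySem.Chars.join_singleton _ _

-- A's five-way slice unpack agrees with B's explicit length test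
theorem pv_classify (full : List String) (acc : List String × List String)
    (i : Int) (l : String) (tail : List String)
    (hslice : PySem.List.slice full (some i) none = tail) :
    aLineStep full acc (i, l)
    = (let ps := (PySem.Str.split? l ":").getD [];
       if ps.length < 5 then acc
       else
         let t := PySem.Str.strip (ps[3]!)
         if PySem.Str.isIn "error" t then (acc.1 ++ [PySem.Str.join "\n" tail], acc.2)
         else if PySem.Str.isIn "warning" t then (acc.1, acc.2 ++ [PySem.Str.join "\n" tail])
         else acc) := by
  unfold aLineStep
  simp only [hslice, PySem.List.slice_to _ (by norm_num : (0:Int) ≤ 5)]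
  match hps : (PySem.Str.split? l ":").getD [] with
  | [] => rfl
  | [_] => rfl
  | [_, _] => rfl
  | [_, _, _] => rfl
  | [_, _, _, _] => rfl
  | p0 :: p1 :: p2 :: p3 :: p4 :: rest =>
    have h3 : (p0 :: p1 :: p2 :: p3 :: p4 :: rest)[3]! = p3 := rfl
    have hlen : ¬ (p0 :: p1 :: p2 :: p3 :: p4 :: rest).length < 5 := by
      simp only [List.length_cons]; omega
    simp only [h3, hlen, if_false]
    rfl

-- B's backward scan computes the running suffix and the reversed forward hits
theorem pvScanBack_eq (lines : List String) :
    pvScanBack lines = ((if lines.isEmpty then none else some (PySem.Str.join "\n" lines)),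
      (pvHits lines).1.reverse, (pvHits lines).2.reverse) := by
  induction lines with
  | nil => rfl
  | cons l rest ih =>
    have hsuf : (match (pvScanBack rest).1 with
        | none => l
        | some s => l ++ "\n" ++ s) = PySem.Str.join "\n" (l :: rest) := by
      rw [ih]
      cases rest with
      | nil => simp [pv_join_singleton]
      | cons q t => simp [pv_join_cons l (q :: t) (by simp)]
    simp only [pvScanBack]
    rw [hsuf, ih]
    simp only [pvHits, List.isEmpty_cons, Bool.false_eq_true, if_false]
    split_ifs <;> simp

-- A's inner enumerate-fold, started at offset n into the block, appends the forward hits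
theorem pvInner (full : List String) (ls : List String) (n : Nat)
    (acc : List String × List String) (hd : full.drop n = ls) :
    (PySem.List.enumerate ls (n : Int)).foldl (aLineStep full) acc
      = (acc.1 ++ (pvHits ls).1, acc.2 ++ (pvHits ls).2) := by
  induction ls generalizing n acc with
  | nil => simp [PySem.List.enumerate, pvHits]
  | cons l rest ih =>
    have hd' : full.drop (n + 1) = rest := by
      rw [← List.tail_drop, hd]; rfl
    have hslice : PySem.List.slice full (some (n : Int)) none = l :: rest := by
      rw [PySem.List.slice_from_natCast, hd]
    rw [PySem.List.enumerate_cons, List.foldl_cons]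
    have hcast : ((n : Int) + 1) = ((n + 1 : Nat) : Int) := by push_cast; ring
    rw [hcast, ih (n + 1) _ hd', pv_classify full acc _ l (l :: rest) hslice]
    simp only [pvHits]
    split_ifs <;> simp

theorem pvBlockStep_eq : aBlockStep = bBlockStep := by
  funext acc b
  unfold aBlockStep bBlockStep
  rw [pvScanBack_eq]
  simpa using pvInner _ _ 0 acc (by simp)

-- ===== VERDICT (by name: the statement is the Claim_ definition above) =====
theorem make_error_blocks_spec : Claim_equal_make_error_blocks := by
  intro content _
  unfold Spec_make_error_blocks make_error_blocks make_error_blocks_alt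
  rw [pvBlockStep_eq]
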